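-- pv_equiv track=rewrite | github.com/artisticdrake/CHATALOGUE | db_interface.py | _get_select_columns
-- ===== SOURCE A (Python) =====
-- from typing import Any, Dict, List, Optional
--
-- COURSE_ATTR_TO_COLS: Dict[str, List[str]] = {
--     "location":     ["location"],
--     "instructor":   ["instructor"],
--     "time":         ["days", "times"],
--     "schedule":     ["days", "times", "location"],
--     "course_name":  ["course_name"],
--     "course_number": ["course_number"],
--     "all": ["course_number", "course_name", "section",
--             "instructor", "location", "days", "times"],
-- }
--
-- def _get_select_columns(attrs: List[str]) -> List[str]:
--     """Map semantic_parse attributes to DB columns."""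
--     if not attrs:
--         attrs = ["all"]
--
--     # Always include these base columns
--     cols: List[str] = ["course_number", "course_name", "section",
--             "instructor", "location", "days", "times"]
--
--     for attr in attrs:
--         key = (attr or "").lower()
--         mapped = COURSE_ATTR_TO_COLS.get(key)
--         if not mapped:
--             mapped = COURSE_ATTR_TO_COLS["all"]
--         for c in mapped:
--             if c not in cols:
--                 cols.append(c)
--
--     # Deduplicate
--     seen = set()
--     deduped: List[str] = []
--     for c in cols:
--         if c not in seen:
--             deduped.append(c)
--             seen.add(c)
--     return deduped
-- ===== SOURCE B (Python) =====
-- def _get_select_columns(attrs):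
--     """Map semantic_parse attributes to DB columns.
--
--     Every mapping in COURSE_ATTR_TO_COLS is a subset of the base columns
--     that are always included, so the result is the constant base list."""
--     return ["course_number", "course_name", "section",
--             "instructor", "location", "days", "times"]
-- ===== Notes on version B (the rewrite author's own statement) =====
-- stated objective: simpler
-- what changed: A's per-attr mapping loop and dedup pass can never change the initial 7 base columns (every COURSE_ATTR_TO_COLS value is a subset of them), so B returns that constant list directly with no loops.
import Mathlib
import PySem

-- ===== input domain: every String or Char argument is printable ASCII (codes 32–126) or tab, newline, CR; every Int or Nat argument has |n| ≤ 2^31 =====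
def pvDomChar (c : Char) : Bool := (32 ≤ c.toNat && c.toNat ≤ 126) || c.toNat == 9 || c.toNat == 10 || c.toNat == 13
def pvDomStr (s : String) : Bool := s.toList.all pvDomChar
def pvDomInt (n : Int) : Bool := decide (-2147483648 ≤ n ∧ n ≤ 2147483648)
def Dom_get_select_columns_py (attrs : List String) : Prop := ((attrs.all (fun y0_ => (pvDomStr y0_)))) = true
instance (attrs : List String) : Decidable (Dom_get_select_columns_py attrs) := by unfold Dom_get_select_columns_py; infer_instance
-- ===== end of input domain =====

-- ===== PORT A =====
-- A's per-attr loop appends mapped columns not yet present, then a dedup pass; literal transliteration.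
def pvBaseCols : List String := ["course_number", "course_name", "section",
    "instructor", "location", "days", "times"]

def pvCourseAttrToCols : PySem.Dict String (List String) := PySem.Dict.ofList [
  ("location", ["location"]),
  ("instructor", ["instructor"]),
  ("time", ["days", "times"]),
  ("schedule", ["days", "times", "location"]),
  ("course_name", ["course_name"]),
  ("course_number", ["course_number"]),
  ("all", ["course_number", "course_name", "section",
    "instructor", "location", "days", "times"])]

def get_select_columns_py (attrs : List String) : List String :=
  let attrs := if attrs = [] then ["all"] else attrs
  let cols : List String := pvBaseCols
  let cols := attrs.foldl (fun cols attr =>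
    let key := PySem.Str.lower (if attr = "" then "" else attr)  -- (attr or "").lower()
    let mapped := PySem.Dict.get? pvCourseAttrToCols key
    let mapped := match mapped with
      | none => PySem.Dict.getD pvCourseAttrToCols "all" []  -- 'if not mapped' also catches an empty list
      | some m => if m = [] then PySem.Dict.getD pvCourseAttrToCols "all" [] else m
    mapped.foldl (fun cols c => if c ∈ cols then cols else cols ++ [c]) cols) cols
  -- Deduplicate
  (cols.foldl (fun (st : List String × PySem.Set String) c =>
      if st.2.contains c then st else (st.1 ++ [c], st.2.add c))
    ([], PySem.Set.ofList [])).1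


-- ===== PORT B =====
-- B: the loops of A are provably no-ops, so return the constant base-column list.
def get_select_columns_py_alt (_attrs : List String) : List String :=
  ["course_number", "course_name", "section",
    "instructor", "location", "days", "times"]


-- ===== PRECONDITION & SPEC =====
def Spec_get_select_columns_py (attrs : List String) (out : List String) : Prop := out = get_select_columns_py_alt attrs
instance (attrs : List String) (out : List String) : Decidable (Spec_get_select_columns_py attrs out) := by unfold Spec_get_select_columns_py; infer_instance

-- ===== CLAIM (what is proved, stated in full; the proofs are below) =====
def Claim_equal_get_select_columns_py : Prop := ∀ (attrs : List String), Dom_get_select_columns_py attrs → Spec_get_select_columns_py attrs (get_select_columns_py attrs)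

-- ===== LEMMAS AND PROOFS =====
-- the inner append-if-absent loop does nothing when everything mapped is already present
theorem pv_inner_noop (m cols : List String) (h : ∀ c ∈ m, c ∈ cols) :
    m.foldl (fun cols c => if c ∈ cols then cols else cols ++ [c]) cols = cols := by
  induction m with
  | nil => rfl
  | cons a t ih =>
    simp only [List.foldl_cons, if_pos (h a (by simp))]
    exact ih (fun c hc => h c (by simp [hc]))

-- every value the dict lookup can produce is a subset of pvBaseCols
theorem pv_mapped_subset (key : String) (m : List String)
    (h : PySem.Dict.get? pvCourseAttrToCols key = some m) : ∀ c ∈ m, c ∈ pvBaseCols := by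
  have hmem := PySem.Dict.mem_items_of_get?_eq_some _ h
  have hv : m ∈ pvCourseAttrToCols.values := by
    simp only [PySem.Dict.values]
    exact List.mem_map.2 ⟨(key, m), hmem, rfl⟩
  have hall : ∀ v ∈ pvCourseAttrToCols.values, ∀ c ∈ v, c ∈ pvBaseCols := by decide
  exact hall m hv

theorem pv_loop_noop (attrs : List String) :
    attrs.foldl (fun cols attr =>
      let key := PySem.Str.lower (if attr = "" then "" else attr)
      let mapped := PySem.Dict.get? pvCourseAttrToCols key
      let mapped := match mapped with
        | none => PySem.Dict.getD pvCourseAttrToCols "all" []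
        | some m => if m = [] then PySem.Dict.getD pvCourseAttrToCols "all" [] else m
      mapped.foldl (fun cols c => if c ∈ cols then cols else cols ++ [c]) cols) pvBaseCols
    = pvBaseCols := by
  induction attrs with
  | nil => rfl
  | cons a t ih =>
    rw [List.foldl_cons]
    set key := PySem.Str.lower (if a = "" then "" else a) with hkey
    rcases hm : PySem.Dict.get? pvCourseAttrToCols key with _ | m
    · simp only [hm]
      rw [pv_inner_noop _ _ (by decide)]
      exact ih
    · simp only [hm]
      split
      · rw [pv_inner_noop _ _ (by decide)]; exact ih
      · rw [pv_inner_noop _ _ (pv_mapped_subset key m hm)]; exact ih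

-- ===== VERDICT (by name: the statement is the Claim_ definition above) =====
theorem get_select_columns_py_spec : Claim_equal_get_select_columns_py := by
  intro attrs _
  unfold Spec_get_select_columns_py get_select_columns_py
  by_cases h : attrs = [] <;>
    simp only [h, reduceIte, pv_loop_noop] <;>
    simp only [get_select_columns_py_alt] <;> decide
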